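-- pv_equiv track=rewrite | github.com/geemaple/leetcode | leetcode/1504.count-submatrices-with-all-ones.py | count
-- ===== SOURCE A (Python) =====
-- def count(arr: list) -> int:
--     n = len(arr)
--     res = 0
--     length = 0
--     for i in range(n):
--         length = 0 if arr[i] == 0 else length + 1
--         res += length
--
--     return res
-- ===== SOURCE B (Python) =====
-- def count(arr: list) -> int:
--     res = 0
--     length = 0
--     for x in arr:
--         if x != 0:
--             length += 1
--         else:
--             res += length * (length + 1) // 2
--             length = 0
--     return res + length * (length + 1) // 2
-- ===== Notes on version B (the rewrite author's own statement) =====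
-- stated objective: alternative
-- what changed: B adds each maximal run's total contribution at once via the triangular closed form length*(length+1)//2 at run boundaries, instead of A's per-element accumulation of the running length.
import Mathlib
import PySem

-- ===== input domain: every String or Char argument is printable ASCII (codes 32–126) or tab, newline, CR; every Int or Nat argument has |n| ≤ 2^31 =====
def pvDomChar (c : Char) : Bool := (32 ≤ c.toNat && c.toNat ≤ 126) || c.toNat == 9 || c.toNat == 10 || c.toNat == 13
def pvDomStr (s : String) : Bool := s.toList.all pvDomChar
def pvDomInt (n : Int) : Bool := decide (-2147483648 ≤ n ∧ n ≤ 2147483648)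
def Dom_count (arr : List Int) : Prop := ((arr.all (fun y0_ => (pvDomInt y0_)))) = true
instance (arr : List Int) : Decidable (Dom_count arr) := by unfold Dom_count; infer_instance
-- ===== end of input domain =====

-- B computes each maximal nonzero run's contribution once via the triangular closed form at run boundaries, instead of A's per-element running-length accumulation (alternative decomposition, same cost).


-- ===== PORT A =====
-- for i in range(n): length = 0 if arr[i] == 0 else length + 1; res += length
def count (arr : List Int) : Int :=
  (arr.foldl (fun (s : Int × Int) x =>
    let length : Int := if x == 0 then 0 else s.2 + 1
    (s.1 + length, length)) (0, 0)).1

-- ===== PORT B =====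
-- triangular closed form: length * (length + 1) // 2
def pvTri (l : Int) : Int := PySem.Int.floordiv (l * (l + 1)) 2

def count_alt (arr : List Int) : Int :=
  let s := arr.foldl (fun (s : Int × Int) x =>
    if x ≠ 0 then (s.1, s.2 + 1) else (s.1 + pvTri s.2, 0)) (0, 0)
  s.1 + pvTri s.2

-- ===== PRECONDITION & SPEC =====
def Spec_count (arr : List Int) (out : Int) : Prop := out = count_alt arr
instance (arr : List Int) (out : Int) : Decidable (Spec_count arr out) := by unfold Spec_count; infer_instance

-- ===== CLAIM (what is proved, stated in full; the proofs are below) =====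
def Claim_equal_count : Prop := ∀ (arr : List Int), Dom_count arr → Spec_count arr (count arr)

-- ===== LEMMAS AND PROOFS =====

theorem pvTri_zero : pvTri 0 = 0 := by decide

theorem pvTri_succ (l : Int) : pvTri l + (l + 1) = pvTri (l + 1) := by
  unfold pvTri
  rw [PySem.Int.floordiv_eq_ediv_of_pos (by norm_num : (0:Int) < 2),
      PySem.Int.floordiv_eq_ediv_of_pos (by norm_num : (0:Int) < 2)]
  obtain ⟨k, hk⟩ := Int.even_mul_succ_self l
  have hk2 : l * (l + 1) = 2 * k := by omega
  have hk3 : (l + 1) * (l + 1 + 1) = 2 * (k + (l + 1)) := by nlinarith [hk2]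
  rw [hk2, hk3, Int.mul_ediv_cancel_left _ (by norm_num), Int.mul_ediv_cancel_left _ (by norm_num)]

theorem fold_agree (l : List Int) : ∀ (r len : Int), 0 ≤ len →
    (l.foldl (fun (s : Int × Int) x =>
      let length : Int := if x == 0 then 0 else s.2 + 1
      (s.1 + length, length)) (r + pvTri len, len)).1 =
    (fun s : Int × Int => s.1 + pvTri s.2)
      (l.foldl (fun (s : Int × Int) x =>
        if x ≠ 0 then (s.1, s.2 + 1) else (s.1 + pvTri s.2, 0)) (r, len)) := by
  induction l with
  | nil => intro r len _; simp
  | cons x xs ih =>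
    intro r len hlen
    by_cases hx : x = 0
    · simp only [List.foldl_cons, hx]
      have h1 : ((r + pvTri len + if (0 : Int) == 0 then 0 else len + 1, if (0 : Int) == 0 then 0 else len + 1) : Int × Int) = (r + pvTri len + pvTri 0, 0) := by
        simp [pvTri_zero]
      have := ih (r + pvTri len) 0 (le_refl 0)
      simpa [pvTri_zero] using this
    · simp only [List.foldl_cons, if_pos (by simpa using hx)]
      have hstep : r + pvTri len + (len + 1) = r + pvTri (len + 1) := by
        have := pvTri_succ len; omega
      have hcond : (x == (0 : Int)) = false := by simpa using hx
      simp only [hcond, Bool.false_eq_true, if_false]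
      rw [hstep]
      exact ih r (len + 1) (by omega)

-- ===== VERDICT (by name: the statement is the Claim_ definition above) =====
theorem count_spec : Claim_equal_count := by
  intro arr _
  unfold Spec_count count count_alt
  have := fold_agree arr 0 0 (le_refl 0)
  simpa [pvTri_zero] using this
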